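-- pv_equiv track=rewrite | github.com/davidvlaminck/InfraDbToArangoDb | Analysis/export_keuringsinfo.py | _sheet_name
-- ===== SOURCE A (Python) =====
-- TARGET_SHEETS = {"V&W-WL", "V&W-WA", "V&W-WO", "V&W-WW", "V&W-WVB", "Tunnel Organ. VL."}
--
-- SHEET_ALIASES: dict[str, str] = {
--     "v&w vlaams-brabant": "V&W-WVB",
--     "v&w-vlaams-brabant": "V&W-WVB",
--     "v&w-wvb": "V&W-WVB",
--     # Agent display-name variants (from agents collection) -> canonical sheet
--     # confirmed mappings provided by the user
--     "v&w oost-vlaanderen": "V&W-WO",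
--     "v&w limburg": "V&W-WL",
--     "v&w antwerpen": "V&W-WA",
--     "v&w west-vlaanderen": "V&W-WW",
--     # Tunnel organisation (agent) maps to the Tunnel sheet
--     "tunnel organ. vl.": "Tunnel Organ. VL.",
-- }
--
-- AGENT_TO_SHEET: dict[str, str] = {
--     # V&W agents
--     "206ba12e-dcc6": "V&W-WO",  # V&W Oost-Vlaanderen (_key)
--     "206ba12e-dcc6-4ed1-887c-978e98aaad41": "V&W-WO",  # uuid
--     "4761b281-fe11": "V&W-WL",  # V&W Limburg
--     "4761b281-fe11-4645-93a6-0e1955330e1c": "V&W-WL",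
--     "5efe6764-007f": "V&W-WA",  # V&W Antwerpen
--     "5efe6764-007f-4099-83d9-29d0b2759211": "V&W-WA",
--     "61f977f9-f8c6": "V&W-WW",  # V&W West-Vlaanderen
--     "61f977f9-f8c6-4faf-859a-2cc180b61511": "V&W-WW",
--     "e3fe5c8e-037b": "V&W-WVB",  # V&W Vlaams-Brabant
--     "e3fe5c8e-037b-40cd-bff7-4617eb8bb86a": "V&W-WVB",
--
--     # Tunnel organisation
--     "7aa92dda-9e03": "Tunnel Organ. VL.",
--     "7aa92dda-9e03-4f10-a0b3-1c6748c332b9": "Tunnel Organ. VL.",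
-- }
--
-- def _sheet_name(toezichtgroep: str | None) -> str:
--     if not toezichtgroep:
--         return "Andere"
--     # normalize and apply known aliases (case-insensitive)
--     key = toezichtgroep.strip()
--     key_lower = key.lower()
--
--     # If the toezichtgroep value directly references an agent _key or uuid,
--     # the AGENT_TO_SHEET mapping takes precedence.
--     if key in AGENT_TO_SHEET:
--         return AGENT_TO_SHEET[key]
--     if key_lower in AGENT_TO_SHEET:
--         return AGENT_TO_SHEET[key_lower]
--
--     # alias map first (case-insensitive)
--     if key_lower in SHEET_ALIASES:
--         return SHEET_ALIASES[key_lower]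
--
--     # case-insensitive match against canonical target names
--     for ts in TARGET_SHEETS:
--         if ts.lower() == key_lower:
--             return ts
--
--     return "Andere"
-- ===== SOURCE B (Python) =====
-- # Inverted index: for each canonical sheet the list of lowered spellings that
-- # denote it (lowered canonical name, display-name aliases, agent _key/uuid);
-- # the function scans the six sheets and tests membership.
-- SHEET_KEYS: dict[str, list[str]] = {
--     "V&W-WL": ["v&w-wl", "v&w limburg",
--                "4761b281-fe11", "4761b281-fe11-4645-93a6-0e1955330e1c"],
--     "V&W-WA": ["v&w-wa", "v&w antwerpen",
--                "5efe6764-007f", "5efe6764-007f-4099-83d9-29d0b2759211"],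
--     "V&W-WO": ["v&w-wo", "v&w oost-vlaanderen",
--                "206ba12e-dcc6", "206ba12e-dcc6-4ed1-887c-978e98aaad41"],
--     "V&W-WW": ["v&w-ww", "v&w west-vlaanderen",
--                "61f977f9-f8c6", "61f977f9-f8c6-4faf-859a-2cc180b61511"],
--     "V&W-WVB": ["v&w-wvb", "v&w vlaams-brabant", "v&w-vlaams-brabant",
--                 "e3fe5c8e-037b", "e3fe5c8e-037b-40cd-bff7-4617eb8bb86a"],
--     "Tunnel Organ. VL.": ["tunnel organ. vl.",
--                           "7aa92dda-9e03", "7aa92dda-9e03-4f10-a0b3-1c6748c332b9"],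
-- }
--
-- def _sheet_name(toezichtgroep: str | None) -> str:
--     if not toezichtgroep:
--         return "Andere"
--     k = toezichtgroep.strip().lower()
--     for sheet, keys in SHEET_KEYS.items():
--         if k in keys:
--             return sheet
--     return "Andere"
-- ===== Notes on version B (the rewrite author's own statement) =====
-- stated objective: alternative
-- what changed: Replaces A's three forward dicts and target-set scan with a single inverted index (sheet -> list of lowered spellings) traversed once with a membership test per sheet; correct because all lowered spellings are pairwise distinct across sheets and agent keys are already lowercase, so A's four-stage precedence collapses.
import Mathlib
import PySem

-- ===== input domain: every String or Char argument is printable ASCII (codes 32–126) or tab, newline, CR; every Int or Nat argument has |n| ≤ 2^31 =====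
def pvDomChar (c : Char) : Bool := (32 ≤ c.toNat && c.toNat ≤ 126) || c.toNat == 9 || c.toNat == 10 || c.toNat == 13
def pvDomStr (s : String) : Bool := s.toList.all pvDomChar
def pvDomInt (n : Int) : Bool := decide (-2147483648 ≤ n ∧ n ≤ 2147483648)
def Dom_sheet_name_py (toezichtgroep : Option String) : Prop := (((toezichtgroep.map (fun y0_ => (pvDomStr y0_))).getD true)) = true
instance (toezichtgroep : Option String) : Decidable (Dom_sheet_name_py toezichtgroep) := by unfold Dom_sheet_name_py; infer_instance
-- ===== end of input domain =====

-- B replaces A's three forward maps and target-name scan by one inverted index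
-- (sheet -> lowered spellings) scanned with a membership test ("alternative").

-- ===== PORT A =====
def AGENT_TO_SHEET : PySem.Dict String String := PySem.Dict.ofList [("206ba12e-dcc6", "V&W-WO"), ("206ba12e-dcc6-4ed1-887c-978e98aaad41", "V&W-WO"), ("4761b281-fe11", "V&W-WL"), ("4761b281-fe11-4645-93a6-0e1955330e1c", "V&W-WL"), ("5efe6764-007f", "V&W-WA"), ("5efe6764-007f-4099-83d9-29d0b2759211", "V&W-WA"), ("61f977f9-f8c6", "V&W-WW"), ("61f977f9-f8c6-4faf-859a-2cc180b61511", "V&W-WW"), ("e3fe5c8e-037b", "V&W-WVB"), ("e3fe5c8e-037b-40cd-bff7-4617eb8bb86a", "V&W-WVB"), ("7aa92dda-9e03", "Tunnel Organ. VL."), ("7aa92dda-9e03-4f10-a0b3-1c6748c332b9", "Tunnel Organ. VL.")]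

def SHEET_ALIASES : PySem.Dict String String := PySem.Dict.ofList [("v&w vlaams-brabant", "V&W-WVB"), ("v&w-vlaams-brabant", "V&W-WVB"), ("v&w-wvb", "V&W-WVB"), ("v&w oost-vlaanderen", "V&W-WO"), ("v&w limburg", "V&W-WL"), ("v&w antwerpen", "V&W-WA"), ("v&w west-vlaanderen", "V&W-WW"), ("tunnel organ. vl.", "Tunnel Organ. VL.")]

def TARGET_SHEETS : PySem.Set String := PySem.Set.ofList ["V&W-WL", "V&W-WA", "V&W-WO", "V&W-WW", "V&W-WVB", "Tunnel Organ. VL."]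

-- the 'for ts in TARGET_SHEETS: if ts.lower() == key_lower: return ts' loop (at most one
-- element can match since the lowered names are distinct, so set-iteration order cannot matter)
def scanTargets (kl : String) : List String → String
  | [] => "Andere"
  | ts :: rest => if PySem.Str.lower ts == kl then ts else scanTargets kl rest

def sheetCore (key : String) : String :=
  let key_lower := PySem.Str.lower key
  match AGENT_TO_SHEET.get? key with
  | some v => v
  | none =>
    match AGENT_TO_SHEET.get? key_lower with
    | some v => v
    | none =>
      match SHEET_ALIASES.get? key_lower with
      | some v => v
      | none => scanTargets key_lower TARGET_SHEETS

def sheet_name_py (toezichtgroep : Option String) : String :=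
  match toezichtgroep with
  | none => "Andere"
  | some s => if s == "" then "Andere" else sheetCore (PySem.Str.strip s)

-- ===== PORT B =====
-- inverted index: canonical sheet -> every lowered spelling that denotes it
def SHEET_KEYS : List (String × List String) :=
  [("V&W-WL", ["v&w-wl", "v&w limburg", "4761b281-fe11", "4761b281-fe11-4645-93a6-0e1955330e1c"]),
   ("V&W-WA", ["v&w-wa", "v&w antwerpen", "5efe6764-007f", "5efe6764-007f-4099-83d9-29d0b2759211"]),
   ("V&W-WO", ["v&w-wo", "v&w oost-vlaanderen", "206ba12e-dcc6", "206ba12e-dcc6-4ed1-887c-978e98aaad41"]),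
   ("V&W-WW", ["v&w-ww", "v&w west-vlaanderen", "61f977f9-f8c6", "61f977f9-f8c6-4faf-859a-2cc180b61511"]),
   ("V&W-WVB", ["v&w-wvb", "v&w vlaams-brabant", "v&w-vlaams-brabant", "e3fe5c8e-037b", "e3fe5c8e-037b-40cd-bff7-4617eb8bb86a"]),
   ("Tunnel Organ. VL.", ["tunnel organ. vl.", "7aa92dda-9e03", "7aa92dda-9e03-4f10-a0b3-1c6748c332b9"])]

-- 'for sheet, keys in SHEET_KEYS.items(): if k in keys: return sheet'
def scanSheets (k : String) : List (String × List String) → String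
  | [] => "Andere"
  | (sheet, keys) :: rest => if keys.contains k then sheet else scanSheets k rest

def sheet_name_py_alt (toezichtgroep : Option String) : String :=
  match toezichtgroep with
  | none => "Andere"
  | some s => if s == "" then "Andere" else scanSheets (PySem.Str.lower (PySem.Str.strip s)) SHEET_KEYS

-- ===== PRECONDITION & SPEC =====
def Spec_sheet_name_py (toezichtgroep : Option String) (out : String) : Prop := out = sheet_name_py_alt toezichtgroep
instance (toezichtgroep : Option String) (out : String) : Decidable (Spec_sheet_name_py toezichtgroep out) := by unfold Spec_sheet_name_py; infer_instance

-- ===== CLAIM (what is proved, stated in full; the proofs are below) =====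
def Claim_equal_sheet_name_py : Prop := ∀ (toezichtgroep : Option String), Dom_sheet_name_py toezichtgroep → Spec_sheet_name_py toezichtgroep (sheet_name_py toezichtgroep)

-- ===== LEMMAS AND PROOFS =====

theorem get?_mk_nil {κ ν : Type} [BEq κ] (x : κ) : (PySem.Dict.mk ([] : List (κ × ν))).get? x = none := rfl

-- A's lookup chain after the exact-case agent check, as a function of the lowered key
def chainLow (kl : String) : String :=
  match AGENT_TO_SHEET.get? kl with
  | some v => v
  | none =>
    match SHEET_ALIASES.get? kl with
    | some v => v
    | none => scanTargets kl TARGET_SHEETS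

theorem chain_eq (kl : String) : chainLow kl = scanSheets kl SHEET_KEYS := by
  by_cases h0 : kl = "206ba12e-dcc6"
  · subst h0; decide
  by_cases h1 : kl = "206ba12e-dcc6-4ed1-887c-978e98aaad41"
  · subst h1; decide
  by_cases h2 : kl = "4761b281-fe11"
  · subst h2; decide
  by_cases h3 : kl = "4761b281-fe11-4645-93a6-0e1955330e1c"
  · subst h3; decide
  by_cases h4 : kl = "5efe6764-007f"
  · subst h4; decide
  by_cases h5 : kl = "5efe6764-007f-4099-83d9-29d0b2759211"
  · subst h5; decide
  by_cases h6 : kl = "61f977f9-f8c6"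
  · subst h6; decide
  by_cases h7 : kl = "61f977f9-f8c6-4faf-859a-2cc180b61511"
  · subst h7; decide
  by_cases h8 : kl = "e3fe5c8e-037b"
  · subst h8; decide
  by_cases h9 : kl = "e3fe5c8e-037b-40cd-bff7-4617eb8bb86a"
  · subst h9; decide
  by_cases h10 : kl = "7aa92dda-9e03"
  · subst h10; decide
  by_cases h11 : kl = "7aa92dda-9e03-4f10-a0b3-1c6748c332b9"
  · subst h11; decide
  by_cases h12 : kl = "v&w vlaams-brabant"
  · subst h12; decide
  by_cases h13 : kl = "v&w-vlaams-brabant"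
  · subst h13; decide
  by_cases h14 : kl = "v&w-wvb"
  · subst h14; decide
  by_cases h15 : kl = "v&w oost-vlaanderen"
  · subst h15; decide
  by_cases h16 : kl = "v&w limburg"
  · subst h16; decide
  by_cases h17 : kl = "v&w antwerpen"
  · subst h17; decide
  by_cases h18 : kl = "v&w west-vlaanderen"
  · subst h18; decide
  by_cases h19 : kl = "tunnel organ. vl."
  · subst h19; decide
  by_cases h20 : kl = "v&w-wl"
  · subst h20; decide
  by_cases h21 : kl = "v&w-wa"
  · subst h21; decide
  by_cases h22 : kl = "v&w-wo"
  · subst h22; decide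
  by_cases h23 : kl = "v&w-ww"
  · subst h23; decide
  rw [chainLow, (by decide : AGENT_TO_SHEET = PySem.Dict.mk [("206ba12e-dcc6", "V&W-WO"), ("206ba12e-dcc6-4ed1-887c-978e98aaad41", "V&W-WO"), ("4761b281-fe11", "V&W-WL"), ("4761b281-fe11-4645-93a6-0e1955330e1c", "V&W-WL"), ("5efe6764-007f", "V&W-WA"), ("5efe6764-007f-4099-83d9-29d0b2759211", "V&W-WA"), ("61f977f9-f8c6", "V&W-WW"), ("61f977f9-f8c6-4faf-859a-2cc180b61511", "V&W-WW"), ("e3fe5c8e-037b", "V&W-WVB"), ("e3fe5c8e-037b-40cd-bff7-4617eb8bb86a", "V&W-WVB"), ("7aa92dda-9e03", "Tunnel Organ. VL."), ("7aa92dda-9e03-4f10-a0b3-1c6748c332b9", "Tunnel Organ. VL.")]),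
    (by decide : SHEET_ALIASES = PySem.Dict.mk [("v&w vlaams-brabant", "V&W-WVB"), ("v&w-vlaams-brabant", "V&W-WVB"), ("v&w-wvb", "V&W-WVB"), ("v&w oost-vlaanderen", "V&W-WO"), ("v&w limburg", "V&W-WL"), ("v&w antwerpen", "V&W-WA"), ("v&w west-vlaanderen", "V&W-WW"), ("tunnel organ. vl.", "Tunnel Organ. VL.")]),
    (by decide : TARGET_SHEETS = ["V&W-WL", "V&W-WA", "V&W-WO", "V&W-WW", "V&W-WVB", "Tunnel Organ. VL."])]
  simp [PySem.Dict.get?_mk_cons, get?_mk_nil, scanTargets, scanSheets, SHEET_KEYS, beq_iff_eq,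
    (by decide : PySem.Str.lower "V&W-WL" = "v&w-wl"),
    (by decide : PySem.Str.lower "V&W-WA" = "v&w-wa"),
    (by decide : PySem.Str.lower "V&W-WO" = "v&w-wo"),
    (by decide : PySem.Str.lower "V&W-WW" = "v&w-ww"),
    (by decide : PySem.Str.lower "V&W-WVB" = "v&w-wvb"),
    (by decide : PySem.Str.lower "Tunnel Organ. VL." = "tunnel organ. vl."),
    Ne.symm h0, Ne.symm h1, Ne.symm h2, Ne.symm h3, Ne.symm h4, Ne.symm h5, Ne.symm h6, Ne.symm h7, Ne.symm h8, Ne.symm h9, Ne.symm h10, Ne.symm h11, Ne.symm h12, Ne.symm h13, Ne.symm h14, Ne.symm h15, Ne.symm h16, Ne.symm h17, Ne.symm h18, Ne.symm h19, Ne.symm h20, Ne.symm h21, Ne.symm h22, Ne.symm h23,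
    h0, h1, h2, h3, h4, h5, h6, h7, h8, h9, h10, h11, h12, h13, h14, h15, h16, h17, h18, h19, h20, h21, h22, h23]

theorem core_eq (key : String) : sheetCore key = scanSheets (PySem.Str.lower key) SHEET_KEYS := by
  by_cases g0 : key = "206ba12e-dcc6"
  · subst g0; decide
  by_cases g1 : key = "206ba12e-dcc6-4ed1-887c-978e98aaad41"
  · subst g1; decide
  by_cases g2 : key = "4761b281-fe11"
  · subst g2; decide
  by_cases g3 : key = "4761b281-fe11-4645-93a6-0e1955330e1c"
  · subst g3; decide
  by_cases g4 : key = "5efe6764-007f"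
  · subst g4; decide
  by_cases g5 : key = "5efe6764-007f-4099-83d9-29d0b2759211"
  · subst g5; decide
  by_cases g6 : key = "61f977f9-f8c6"
  · subst g6; decide
  by_cases g7 : key = "61f977f9-f8c6-4faf-859a-2cc180b61511"
  · subst g7; decide
  by_cases g8 : key = "e3fe5c8e-037b"
  · subst g8; decide
  by_cases g9 : key = "e3fe5c8e-037b-40cd-bff7-4617eb8bb86a"
  · subst g9; decide
  by_cases g10 : key = "7aa92dda-9e03"
  · subst g10; decide
  by_cases g11 : key = "7aa92dda-9e03-4f10-a0b3-1c6748c332b9"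
  · subst g11; decide
  have hA : AGENT_TO_SHEET.get? key = none := by
    rw [(by decide : AGENT_TO_SHEET = PySem.Dict.mk [("206ba12e-dcc6", "V&W-WO"), ("206ba12e-dcc6-4ed1-887c-978e98aaad41", "V&W-WO"), ("4761b281-fe11", "V&W-WL"), ("4761b281-fe11-4645-93a6-0e1955330e1c", "V&W-WL"), ("5efe6764-007f", "V&W-WA"), ("5efe6764-007f-4099-83d9-29d0b2759211", "V&W-WA"), ("61f977f9-f8c6", "V&W-WW"), ("61f977f9-f8c6-4faf-859a-2cc180b61511", "V&W-WW"), ("e3fe5c8e-037b", "V&W-WVB"), ("e3fe5c8e-037b-40cd-bff7-4617eb8bb86a", "V&W-WVB"), ("7aa92dda-9e03", "Tunnel Organ. VL."), ("7aa92dda-9e03-4f10-a0b3-1c6748c332b9", "Tunnel Organ. VL.")])]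
    simp [PySem.Dict.get?_mk_cons, get?_mk_nil, beq_iff_eq, Ne.symm g0, Ne.symm g1, Ne.symm g2, Ne.symm g3, Ne.symm g4, Ne.symm g5, Ne.symm g6, Ne.symm g7, Ne.symm g8, Ne.symm g9, Ne.symm g10, Ne.symm g11]
  have h : sheetCore key = chainLow (PySem.Str.lower key) := by
    simp [sheetCore, chainLow, hA]
  rw [h, chain_eq]

-- ===== VERDICT (by name: the statement is the Claim_ definition above) =====
theorem sheet_name_py_spec : Claim_equal_sheet_name_py := by
  intro t _
  unfold Spec_sheet_name_py
  cases t with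
  | none => rfl
  | some s =>
    by_cases hs : s = ""
    · subst hs; rfl
    · simp only [sheet_name_py, sheet_name_py_alt, beq_iff_eq, if_neg hs]
      exact core_eq (PySem.Str.strip s)
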